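-- pv_equiv track=rewrite | github.com/lexei1297/pythonDomashka | Class4/War and peace analysis.py | create_chapters_dicts
-- ===== SOURCE A (Python) =====
-- def word_dictionary(data):
--     """
--     Creates a word frequency dictionary from the given data.
--
--     Args:
--         data (list): List of words.
--
--     Returns:
--         dict: A dictionary with words as keys and their counts as values.
--     """
--     frequency_dict = {}
--     for word in data:
--         if word not in frequency_dict:
--             frequency_dict[word] = 1
--         else:
--             frequency_dict[word] += 1
--     return frequency_dict
--
-- def create_chapters_dicts(data):
--     """
--     Creates a list of word frequency dictionaries, one for each chapter.
--
--     Args: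
--         data (list): List of words with chapter delimiters `[new chapter]`.
--
--     Returns:
--         list: A list of dictionaries, each representing word frequencies for a chapter.
--     """
--     chapter_indices = [i for i, line in enumerate(data) if line == '[new chapter]']
--     chapters = []
--     start = 0
--
--     for index in chapter_indices:
--         chapter_content = data[start:index]
--         chapter_frequency = word_dictionary(chapter_content)
--         chapters.append(chapter_frequency)
--         start = index + 1
--
--     # Add the last chapter
--     last_chapter = data[start:]
--     chapters.append(word_dictionary(last_chapter))
--     return chapters
-- ===== SOURCE B (Python) =====
-- def create_chapters_dicts(data):
--     """Single streaming pass: maintain the current chapter's dict inline,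
--     flushing it whenever the delimiter is seen."""
--     chapters = []
--     current = {}
--     for word in data:
--         if word == '[new chapter]':
--             chapters.append(current)
--             current = {}
--         else:
--             current[word] = current.get(word, 0) + 1
--     chapters.append(current)
--     return chapters
-- ===== Notes on version B (the rewrite author's own statement) =====
-- stated objective: simpler
-- what changed: Replaces the two-phase index-collection-plus-slicing (enumerate to find delimiter positions, then slice each segment and count it in a helper) with one streaming pass that maintains the current chapter's counter inline and flushes it at each delimiter.
import Mathlib
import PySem

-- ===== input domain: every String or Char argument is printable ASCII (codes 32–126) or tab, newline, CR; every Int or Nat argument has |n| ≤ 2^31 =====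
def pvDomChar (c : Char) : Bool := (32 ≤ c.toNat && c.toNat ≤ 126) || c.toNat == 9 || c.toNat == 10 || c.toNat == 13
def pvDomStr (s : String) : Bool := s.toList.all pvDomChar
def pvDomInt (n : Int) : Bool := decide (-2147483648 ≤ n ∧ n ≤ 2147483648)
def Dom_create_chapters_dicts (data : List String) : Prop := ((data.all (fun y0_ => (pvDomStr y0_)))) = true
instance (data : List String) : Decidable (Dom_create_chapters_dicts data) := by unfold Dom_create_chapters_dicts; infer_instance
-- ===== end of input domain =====

-- B replaces A's index-then-slice two-phase pass by a single streaming pass with an inline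
-- current-chapter counter (objective: simpler). Both are total; return values proved equal.

-- ===== PORT A =====
-- word_dictionary: dict of word counts, first occurrence inserts 1, later ones += 1
def word_dictionary (data : List String) : List (String × Int) :=
  (data.foldl
    (fun (d : PySem.Dict String Int) word =>
      if d.contains word = false then d.insert word 1 else d.modify word 0 (· + 1))
    PySem.Dict.empty).items

-- the loop body of A's `for index in chapter_indices` (state = (chapters, start))
def pvStepA (data : List String) (st : List (List (String × Int)) × Int) (index : Int) :
    List (List (String × Int)) × Int :=
  (st.1 ++ [word_dictionary (PySem.List.slice data (some st.2) (some index))], index + 1)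

def create_chapters_dicts (data : List String) : List (List (String × Int)) :=
  let chapter_indices :=
    ((PySem.List.enumerate data).filter (fun p => p.2 == "[new chapter]")).map (·.1)
  let r := chapter_indices.foldl (pvStepA data) ([], 0)
  r.1 ++ [word_dictionary (PySem.List.slice data (some r.2) none)]

-- ===== PORT B =====
-- the loop body of B's single pass (state = (chapters, current))
def pvStepB (st : List (List (String × Int)) × PySem.Dict String Int) (word : String) :
    List (List (String × Int)) × PySem.Dict String Int :=
  if word == "[new chapter]" then (st.1 ++ [st.2.items], PySem.Dict.empty)
  else (st.1, st.2.insert word (st.2.getD word 0 + 1))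

def create_chapters_dicts_alt (data : List String) : List (List (String × Int)) :=
  let r := data.foldl pvStepB ([], PySem.Dict.empty)
  r.1 ++ [r.2.items]

-- ===== PRECONDITION & SPEC =====
def Spec_create_chapters_dicts (data : List String) (out : List (List (String × Int))) : Prop := out = create_chapters_dicts_alt data
instance (data : List String) (out : List (List (String × Int))) : Decidable (Spec_create_chapters_dicts data out) := by unfold Spec_create_chapters_dicts; infer_instance

-- ===== CLAIM (what is proved, stated in full; the proofs are below) =====
def Claim_equal_create_chapters_dicts : Prop := ∀ (data : List String), Dom_create_chapters_dicts data → Spec_create_chapters_dicts data (create_chapters_dicts data)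

-- ===== LEMMAS AND PROOFS =====

-- first segment / remaining segments of `data` split at the delimiter
def pvSegs : List String → List String × List (List String)
  | [] => ([], [])
  | w :: rest =>
    let p := pvSegs rest
    if w = "[new chapter]" then ([], p.1 :: p.2) else (w :: p.1, p.2)

-- counting fold shared by both characterisations
def pvFoldIns (d : PySem.Dict String Int) (l : List String) : PySem.Dict String Int :=
  l.foldl (fun d w => d.insert w (d.getD w 0 + 1)) d

def pvF (l : List String) : List (String × Int) := (pvFoldIns PySem.Dict.empty l).items

-- the common value both programs compute
def pvSpec (data : List String) : List (List (String × Int)) :=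
  pvF (pvSegs data).1 :: ((pvSegs data).2).map pvF

-- nat positions of the delimiter
def pvIdxN : List String → List Nat
  | [] => []
  | w :: rest =>
    if w = "[new chapter]" then 0 :: (pvIdxN rest).map (· + 1) else (pvIdxN rest).map (· + 1)

lemma pvStep_eq :
    (fun (d : PySem.Dict String Int) word =>
      if d.contains word = false then d.insert word 1 else d.modify word 0 (· + 1)) =
    (fun (d : PySem.Dict String Int) w => d.insert w (d.getD w 0 + 1)) := by
  funext d w
  by_cases h : d.contains w = false
  · simp [h, PySem.Dict.getD_of_not_contains d 0 h]
  · simp [h]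
    rfl

lemma pvWd_eq (l : List String) : word_dictionary l = pvF l := by
  simp [word_dictionary, pvF, pvFoldIns, pvStep_eq]

lemma pvEnumFilter (xs : List String) : ∀ (s : Int),
    ((PySem.List.enumerate xs s).filter (fun p => p.2 == "[new chapter]")).map (·.1)
      = (pvIdxN xs).map (fun k : Nat => (k : Int) + s) := by
  induction xs with
  | nil => intro s; simp [PySem.List.enumerate_nil, pvIdxN]
  | cons w rest ih =>
    intro s
    rw [PySem.List.enumerate_cons, List.filter_cons]
    have hmap : ((pvIdxN rest).map (· + 1)).map (fun k : Nat => (k : Int) + s)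
        = (pvIdxN rest).map (fun k : Nat => (k : Int) + (s + 1)) := by
      rw [List.map_map]
      refine List.map_congr_left ?_
      intro k _
      simp only [Function.comp_apply]
      push_cast; ring
    by_cases h : w = "[new chapter]"
    · simp only [h, beq_self_eq_true, if_pos, List.map_cons, ih (s + 1), pvIdxN, hmap]
      simp
    · have hb : (w == "[new chapter]") = false := by simp [h]
      simp only [hb, Bool.false_eq_true, if_false, ih (s + 1), pvIdxN, h, hmap]

lemma pvSliceShift (w : String) (rest : List String) (s k : Nat) :
    PySem.List.slice (w :: rest) (some ((s : Int) + 1)) (some ((k : Int) + 1))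
      = PySem.List.slice rest (some (s : Int)) (some (k : Int)) := by
  have h1 : (s : Int) + 1 = ((s + 1 : Nat) : Int) := by push_cast; ring
  have h2 : (k : Int) + 1 = ((k + 1 : Nat) : Int) := by push_cast; ring
  rw [h1, h2, PySem.List.slice_natCast, PySem.List.slice_natCast]
  simp [Nat.succ_sub_succ]

lemma pvShiftA (w : String) (rest : List String) : ∀ (ks : List Nat)
    (acc : List (List (String × Int))) (s : Nat),
    (ks.map (fun k : Nat => (k : Int) + 1)).foldl (pvStepA (w :: rest)) (acc, (s : Int) + 1)
      = (((ks.map (fun k : Nat => (k : Int))).foldl (pvStepA rest) (acc, (s : Int))).1,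
         ((ks.map (fun k : Nat => (k : Int))).foldl (pvStepA rest) (acc, (s : Int))).2 + 1) := by
  intro ks
  induction ks with
  | nil => intro acc s; simp
  | cons k ks ih =>
    intro acc s
    simp only [List.map_cons, List.foldl_cons]
    have h1 : pvStepA (w :: rest) (acc, (s : Int) + 1) ((k : Int) + 1)
        = (acc ++ [word_dictionary (PySem.List.slice rest (some (s : Int)) (some (k : Int)))],
           ((k + 1 : Nat) : Int) + 1) := by
      unfold pvStepA
      rw [pvSliceShift w rest s k]
      simp only [Prod.mk.injEq]
      exact ⟨trivial, by push_cast; ring⟩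
    have h2 : pvStepA rest (acc, (s : Int)) ((k : Int))
        = (acc ++ [word_dictionary (PySem.List.slice rest (some (s : Int)) (some (k : Int)))],
           ((k + 1 : Nat) : Int)) := by
      unfold pvStepA
      simp only [Prod.mk.injEq]
      exact ⟨trivial, by push_cast; ring⟩
    rw [h1, ih _ (k + 1), h2]

lemma pvSndNat (xs : List String) : ∀ (ks : List Nat)
    (acc : List (List (String × Int))) (s : Nat),
    ∃ t : Nat, ((ks.map (fun k : Nat => (k : Int))).foldl (pvStepA xs) (acc, (s : Int))).2 = (t : Int) := by
  intro ks
  induction ks with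
  | nil => intro acc s; exact ⟨s, rfl⟩
  | cons k ks ih =>
    intro acc s
    simp only [List.map_cons, List.foldl_cons]
    have h2 : pvStepA xs (acc, (s : Int)) (k : Int)
        = (acc ++ [word_dictionary (PySem.List.slice xs (some (s : Int)) (some (k : Int)))],
           ((k + 1 : Nat) : Int)) := by
      unfold pvStepA
      simp only [Prod.mk.injEq]
      exact ⟨trivial, by push_cast; ring⟩
    rw [h2]
    exact ih _ (k + 1)

lemma pvAccAppend (xs : List String) : ∀ (ks : List Int)
    (acc : List (List (String × Int))) (s : Int),
    ks.foldl (pvStepA xs) (acc, s)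
      = (acc ++ (ks.foldl (pvStepA xs) ([], s)).1, (ks.foldl (pvStepA xs) ([], s)).2) := by
  intro ks
  induction ks with
  | nil => intro acc s; simp
  | cons k ks ih =>
    intro acc s
    simp only [List.foldl_cons, pvStepA]
    rw [ih (acc ++ [word_dictionary (PySem.List.slice xs (some s) (some k))]) (k + 1),
        ih ([] ++ [word_dictionary (PySem.List.slice xs (some s) (some k))]) (k + 1)]
    simp

lemma pvSegsOfIdx : ∀ (data : List String),
    (pvIdxN data = [] → pvSegs data = (data, [])) ∧
    (∀ k ks, pvIdxN data = k :: ks → (pvSegs data).1 = data.take k) := by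
  intro data
  induction data with
  | nil => exact ⟨fun _ => rfl, fun k ks h => by simp [pvIdxN] at h⟩
  | cons w rest ih =>
    by_cases h : w = "[new chapter]"
    · refine ⟨fun hn => ?_, fun k ks hk => ?_⟩
      · simp [pvIdxN, h] at hn
      · simp only [pvIdxN, h, if_true] at hk
        cases hk
        simp [pvSegs, h]
    · refine ⟨fun hn => ?_, fun k ks hk => ?_⟩
      · simp only [pvIdxN, h, if_false] at hn
        have : pvIdxN rest = [] := by
          cases he : pvIdxN rest with
          | nil => rfl
          | cons a b => rw [he] at hn; simp at hn
        simp [pvSegs, h, ih.1 this]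
      · simp only [pvIdxN, h, if_false] at hk
        cases he : pvIdxN rest with
        | nil => rw [he] at hk; simp at hk
        | cons a b =>
          rw [he] at hk
          simp only [List.map_cons] at hk
          obtain ⟨hk1, _⟩ := List.cons.inj hk
          subst hk1
          simp [pvSegs, h, ih.2 a b he]

-- unfold A once into fold-over-nat-indices form
lemma pvA_form (data : List String) :
    create_chapters_dicts data
      = (let r := ((pvIdxN data).map (fun k : Nat => (k : Int))).foldl (pvStepA data) ([], 0)
         r.1 ++ [word_dictionary (PySem.List.slice data (some r.2) none)]) := by
  have := pvEnumFilter data 0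
  simp only [add_zero] at this
  simp only [create_chapters_dicts, this]

lemma pvA_eq_spec : ∀ (data : List String), create_chapters_dicts data = pvSpec data := by
  intro data
  induction data with
  | nil =>
    decide
  | cons w rest ih =>
    rw [pvA_form]
    have hcomp : ((fun k : Nat => (k : Int)) ∘ (fun k : Nat => k + 1))
        = (fun k : Nat => (k : Int) + 1) := by
      funext k; simp
    by_cases h : w = "[new chapter]"
    · -- delimiter: first chapter is empty, the rest shifts by one position
      subst h
      have hidx : pvIdxN ("[new chapter]" :: rest) = 0 :: (pvIdxN rest).map (· + 1) := by
        simp [pvIdxN]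
      rw [hidx]
      simp only [List.map_cons, List.map_map, List.foldl_cons, hcomp]
      have hstep0 : pvStepA ("[new chapter]" :: rest)
            (([] : List (List (String × Int))), (0 : Int)) (((0 : Nat) : Int))
          = ([[]], ((0 : Nat) : Int) + 1) := by
        unfold pvStepA
        have hs : PySem.List.slice ("[new chapter]" :: rest) (some (0 : Int))
            (some ((0 : Nat) : Int)) = [] := by
          rw [show (0 : Int) = ((0 : Nat) : Int) from rfl, PySem.List.slice_natCast]
          simp
        rw [hs]
        rfl
      rw [hstep0, pvShiftA "[new chapter]" rest (pvIdxN rest) [[]] 0]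
      rw [pvAccAppend rest ((pvIdxN rest).map (fun k : Nat => (k : Int))) [[]] ((0 : Nat) : Int)]
      obtain ⟨t, ht⟩ := pvSndNat rest (pvIdxN rest) [] 0
      simp only at ht ⊢
      rw [ht]
      have hslice : PySem.List.slice ("[new chapter]" :: rest) (some ((t : Int) + 1)) none
          = PySem.List.slice rest (some (t : Int)) none := by
        rw [show (t : Int) + 1 = ((t + 1 : Nat) : Int) from by push_cast; ring,
            PySem.List.slice_from_natCast, PySem.List.slice_from_natCast]
        rfl
      rw [hslice]
      have hspec : pvSpec ("[new chapter]" :: rest) = [] :: pvSpec rest := by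
        simp [pvSpec, pvSegs, pvF, pvFoldIns]
        rfl
      rw [hspec, ← ih, pvA_form]
      simp only [Nat.cast_zero] at ht ⊢
      rw [ht]
      simp
    · -- ordinary word
      have hidx : pvIdxN (w :: rest) = (pvIdxN rest).map (· + 1) := by
        simp [pvIdxN, h]
      rw [hidx]
      cases he : pvIdxN rest with
      | nil =>
        simp only [List.map_nil, List.foldl_nil]
        have h0 : PySem.List.slice (w :: rest) (some (0 : Int)) none = w :: rest := by
          rw [show (0 : Int) = ((0 : Nat) : Int) from rfl, PySem.List.slice_from_natCast]
          rfl
        rw [h0]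
        have hsegs : pvSegs (w :: rest) = (w :: rest, []) := by
          have h1 := (pvSegsOfIdx rest).1 he
          simp [pvSegs, h, h1]
        simp [pvSpec, hsegs, pvWd_eq]
      | cons k ks =>
        simp only [List.map_cons, List.map_map, List.foldl_cons, hcomp]
        have hfirst : pvStepA (w :: rest) (([] : List (List (String × Int))), (0 : Int))
              (((k + 1 : Nat) : Int))
            = ([word_dictionary (w :: rest.take k)], ((k + 1 : Nat) : Int) + 1) := by
          unfold pvStepA
          have hs : PySem.List.slice (w :: rest) (some (0 : Int)) (some ((k + 1 : Nat) : Int))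
              = w :: rest.take k := by
            rw [show (0 : Int) = ((0 : Nat) : Int) from rfl, PySem.List.slice_natCast]
            simp
          rw [hs]
          rfl
        rw [hfirst, pvShiftA w rest ks [word_dictionary (w :: rest.take k)] (k + 1)]
        rw [pvAccAppend rest (ks.map (fun k : Nat => (k : Int)))
              [word_dictionary (w :: rest.take k)] ((k + 1 : Nat) : Int)]
        obtain ⟨t, ht⟩ := pvSndNat rest ks [] (k + 1)
        simp only at ht ⊢
        rw [ht]
        have hslice : PySem.List.slice (w :: rest) (some ((t : Int) + 1)) none
            = PySem.List.slice rest (some (t : Int)) none := by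
          rw [show (t : Int) + 1 = ((t + 1 : Nat) : Int) from by push_cast; ring,
              PySem.List.slice_from_natCast, PySem.List.slice_from_natCast]
          rfl
        rw [hslice]
        -- express A rest in the same shape
        rw [pvA_form] at ih
        rw [he] at ih
        simp only [List.map_cons, List.foldl_cons] at ih
        have hfirst' : pvStepA rest (([] : List (List (String × Int))), (0 : Int)) ((k : Int))
            = ([word_dictionary (rest.take k)], ((k + 1 : Nat) : Int)) := by
          unfold pvStepA
          have hs : PySem.List.slice rest (some (0 : Int)) (some (k : Int)) = rest.take k := by
            rw [show (0 : Int) = ((0 : Nat) : Int) from rfl, PySem.List.slice_natCast]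
            simp
          rw [hs]
          simp only [Prod.mk.injEq]
          exact ⟨by simp, by push_cast; ring⟩
        rw [hfirst',
            pvAccAppend rest (ks.map (fun k : Nat => (k : Int)))
              [word_dictionary (rest.take k)] ((k + 1 : Nat) : Int),
            ht] at ih
        simp only at ih
        have htake := (pvSegsOfIdx rest).2 k ks he
        have hsegs : pvSegs (w :: rest) = (w :: (pvSegs rest).1, (pvSegs rest).2) := by
          simp [pvSegs, h]
        have hspec : pvSpec rest = pvF (rest.take k) :: ((pvSegs rest).2).map pvF := by
          simp [pvSpec, htake]
        rw [hspec] at ih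
        rw [pvWd_eq (rest.take k)] at ih
        have htail := (List.cons.inj ih.symm).2
        simp only [List.append_eq, List.nil_append] at htail
        have hspec2 : pvSpec (w :: rest)
            = pvF (w :: List.take k rest) :: List.map pvF (pvSegs rest).2 := by
          simp [pvSpec, hsegs, htake]
        rw [hspec2, htail, pvWd_eq, List.cons_append]
        simp

lemma pvB_fold : ∀ (data : List String) (acc : List (List (String × Int)))
    (d : PySem.Dict String Int),
    (data.foldl pvStepB (acc, d)).1 ++ [(data.foldl pvStepB (acc, d)).2.items]
      = acc ++ (pvFoldIns d (pvSegs data).1).items :: ((pvSegs data).2).map pvF := by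
  intro data
  induction data with
  | nil => intro acc d; simp [pvSegs, pvFoldIns]
  | cons w rest ih =>
    intro acc d
    by_cases h : w = "[new chapter]"
    · subst h
      simp only [List.foldl_cons, pvStepB, beq_self_eq_true, if_true]
      rw [ih]
      simp [pvSegs, pvFoldIns, pvF]
    · have hb : (w == "[new chapter]") = false := by simp [h]
      simp only [List.foldl_cons, pvStepB, hb, Bool.false_eq_true, if_false]
      rw [ih]
      simp [pvSegs, h, pvFoldIns]

lemma pvB_eq_spec (data : List String) : create_chapters_dicts_alt data = pvSpec data := by
  have := pvB_fold data [] PySem.Dict.empty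
  simpa [create_chapters_dicts_alt, pvSpec, pvFoldIns, pvF] using this

-- ===== VERDICT (by name: the statement is the Claim_ definition above) =====
theorem create_chapters_dicts_spec : Claim_equal_create_chapters_dicts := by
  intro data _
  unfold Spec_create_chapters_dicts
  rw [pvA_eq_spec data, pvB_eq_spec data]
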